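-- pv_equiv track=rewrite | github.com/youneshlal7/BabelInkCrypt | main.py | calculate_character_frequency
-- ===== SOURCE A (Python) =====
-- def calculate_character_frequency(input_string):
--     character_frequency = {}
--
--     for char in input_string:
--         if char.isalpha():
--             character_frequency[char] = character_frequency.get(char, 0) + 1
--         elif char.isdigit():
--             numeric_mapping = {
--                 '0': 'ze', '1': 'on', '2': 'tw', '3': 'th', '4': 'fo',
--                 '5': 'fi', '6': 'si', '7': 'se', '8': 'ei', '9': 'ni'
--             }
--             mapped_char = numeric_mapping[char]
--             character_frequency[mapped_char] = character_frequency.get(mapped_char, 0) + 1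
--
--     result = ""
--     for char, frequency in character_frequency.items():
--         result += f"{char}{frequency}"
--
--     return result
-- ===== SOURCE B (Python) =====
-- _NUM = {'0': 'ze', '1': 'on', '2': 'tw', '3': 'th', '4': 'fo',
--         '5': 'fi', '6': 'si', '7': 'se', '8': 'ei', '9': 'ni'}
--
-- def calculate_character_frequency(input_string):
--     # tokenise: alpha chars stay, digits become their 2-letter code, others drop
--     tokens = [_NUM[c] if c.isdigit() else c
--               for c in input_string if c.isalpha() or c.isdigit()]
--     # selection-by-removal: repeatedly take the first remaining token, strip all
--     # its occurrences, and derive its count from the shrinkage in length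
--     parts = []
--     while tokens:
--         t = tokens[0]
--         before = len(tokens)
--         tokens = [x for x in tokens if x != t]
--         parts.append(t + str(before - len(tokens)))
--     return ''.join(parts)
-- ===== Notes on version B (the rewrite author's own statement) =====
-- stated objective: alternative
-- what changed: A counts in one pass with an accumulating dict; B tokenises (alpha char or 2-letter digit code), then runs a selection-by-removal loop with no dict or counter at all: repeatedly emit the first remaining token, filter out all its occurrences, and obtain its count from the drop in list length.
import Mathlib
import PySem

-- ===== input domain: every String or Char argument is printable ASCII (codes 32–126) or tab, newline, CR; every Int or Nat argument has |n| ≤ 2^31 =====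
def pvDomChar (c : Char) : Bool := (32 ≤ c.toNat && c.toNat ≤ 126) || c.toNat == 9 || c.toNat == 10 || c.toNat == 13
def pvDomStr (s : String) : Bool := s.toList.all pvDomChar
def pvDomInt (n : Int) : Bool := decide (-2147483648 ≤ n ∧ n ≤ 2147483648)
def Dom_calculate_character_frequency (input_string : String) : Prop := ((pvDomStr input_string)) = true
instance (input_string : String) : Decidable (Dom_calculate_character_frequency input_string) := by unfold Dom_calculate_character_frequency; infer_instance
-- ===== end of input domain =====

-- B replaces A's single accumulating-dict pass by tokenise, then a selection-by-removal
-- loop: repeatedly emit the first remaining token, strip all its occurrences, and read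
-- its count off the shrinkage in list length (objective: alternative; not claimed faster).

-- ===== PORT A =====
-- the numeric_mapping literal dict of A (identical to B's module constant _NUM)
def pvNumMapping : PySem.Dict String String :=
  PySem.Dict.ofList [("0", "ze"), ("1", "on"), ("2", "tw"), ("3", "th"), ("4", "fo"),
                     ("5", "fi"), ("6", "si"), ("7", "se"), ("8", "ei"), ("9", "ni")]

-- loop body of A's first for-loop (the digit lookup cannot miss: isdigit guards it)
def pvStepA (d : PySem.Dict String Int) (c : Char) : PySem.Dict String Int :=
  if PySem.Chars.isalpha c then
    d.insert (String.singleton c) (d.getD (String.singleton c) 0 + 1)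
  else if PySem.Chars.isdigit c then
    let mapped_char := pvNumMapping.getD (String.singleton c) ""
    d.insert mapped_char (d.getD mapped_char 0 + 1)
  else d

def calculate_character_frequency (input_string : String) : String :=
  let character_frequency := input_string.toList.foldl pvStepA PySem.Dict.empty
  character_frequency.items.foldl (fun result p => result ++ p.1 ++ PySem.Int.toStr p.2) ""

-- ===== PORT B =====
-- the token list comprehension of Source B
def pvTokens (input_string : String) : List String :=
  (input_string.toList.filter
      (fun c => PySem.Chars.isalpha c || PySem.Chars.isdigit c)).map
    (fun c => if PySem.Chars.isdigit c then pvNumMapping.getD (String.singleton c) ""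
              else String.singleton c)

-- Source B's while-loop: take tokens[0], filter out all its occurrences, emit t + str(before - after)
def pvEmit : List String → List String
  | [] => []
  | t :: rest =>
      let tokens' := (t :: rest).filter (fun x => x != t)
      (t ++ PySem.Int.toStr (((t :: rest).length : Int) - (tokens'.length : Int)))
        :: pvEmit tokens'
termination_by l => l.length
decreasing_by
  simp only [List.filter_cons, bne_self_eq_false]
  exact Nat.lt_succ_of_le (List.length_filter_le _ _)

def calculate_character_frequency_alt (input_string : String) : String :=
  PySem.Str.join "" (pvEmit (pvTokens input_string))

-- ===== PRECONDITION & SPEC =====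
def Spec_calculate_character_frequency (input_string : String) (out : String) : Prop := out = calculate_character_frequency_alt input_string
instance (input_string : String) (out : String) : Decidable (Spec_calculate_character_frequency input_string out) := by unfold Spec_calculate_character_frequency; infer_instance

-- ===== CLAIM (what is proved, stated in full; the proofs are below) =====
def Claim_equal_calculate_character_frequency : Prop := ∀ (input_string : String), Dom_calculate_character_frequency input_string → Spec_calculate_character_frequency input_string (calculate_character_frequency input_string)

-- ===== LEMMAS AND PROOFS =====

-- A's per-char loop is the counter loop run over B's token list
theorem pvFoldA_eq_tokens (cs : List Char) (d : PySem.Dict String Int) :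
    cs.foldl pvStepA d =
      ((cs.filter (fun c => PySem.Chars.isalpha c || PySem.Chars.isdigit c)).map
        (fun c => if PySem.Chars.isdigit c then pvNumMapping.getD (String.singleton c) ""
                  else String.singleton c)).foldl
        (fun d t => d.insert t (d.getD t 0 + 1)) d := by
  induction cs generalizing d with
  | nil => rfl
  | cons c cs ih =>
    by_cases ha : PySem.Chars.isalpha c = true
    · have hd : PySem.Chars.isdigit c = false := by
        simp [PySem.Chars.isalpha, PySem.Chars.isupper, PySem.Chars.islower,
              PySem.Chars.isdigit, Char.le_def, UInt32.le_iff_toNat_le] at ha ⊢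
        rcases ha with h | h <;> omega
      simp [pvStepA, ha, hd, ih]
    · by_cases hd : PySem.Chars.isdigit c = true
      · simp only [List.foldl_cons, pvStepA, ha, if_true, List.filter_cons,
          Bool.or_eq_true, hd, or_true, if_true, List.map_cons]
        exact ih _
      · simp [pvStepA, ha, hd, ih]

-- A's result loop: left fold of string appends is "" .join of the pieces (on toList)
theorem pvFoldAppend_toList (l : List (String × Int)) (a : String) :
    (l.foldl (fun r p => r ++ p.1 ++ PySem.Int.toStr p.2) a).toList =
      a.toList ++ (l.map (fun p => p.1.toList ++ (PySem.Int.toStr p.2).toList)).flatten := by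
  induction l generalizing a with
  | nil => simp
  | cons p l ih => simp [ih, String.toList_append]

-- "" .join on the character level is flatten
theorem pvJoin_nil_flatten (parts : List (List Char)) :
    PySem.Chars.join [] parts = parts.flatten := by
  induction parts with
  | nil => rfl
  | cons p ps ih =>
    cases ps with
    | nil => simp [PySem.Chars.join, List.intercalate]
    | cons q qs =>
      rw [PySem.Chars.join_cons_cons, ih]
      simp

-- folding Set.add over a list ignores elements already in the accumulator
theorem pvFoldAdd_filter (t : String) (l : List String) (s : PySem.Set String)
    (h : s.contains t = true) :
    l.foldl PySem.Set.add s = (l.filter (fun x => x != t)).foldl PySem.Set.add s := by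
  induction l generalizing s with
  | nil => rfl
  | cons x l ih =>
    by_cases hx : x = t
    · subst hx
      have hadd : PySem.Set.add s x = s := by rw [PySem.Set.add, if_pos h]
      simp only [List.foldl_cons, List.filter_cons, bne_self_eq_false,
        Bool.false_eq_true, if_false, hadd]
      exact ih s h
    · have hb : (x != t) = true := by simp [hx]
      simp only [List.foldl_cons, List.filter_cons, hb, if_true]
      apply ih
      rw [PySem.Set.add]
      split
      · exact h
      · have ht : t ∈ s := by simpa [PySem.Set.contains] using h
        simp [PySem.Set.contains]
        exact Or.inl ht

-- folding Set.add past a distinguished head the tail never mentions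
theorem pvFoldAdd_cons (t : String) (l : List String) (s : PySem.Set String)
    (h : t ∉ l) :
    l.foldl PySem.Set.add (t :: s) = t :: l.foldl PySem.Set.add s := by
  induction l generalizing s with
  | nil => rfl
  | cons x l ih =>
    have hx : x ≠ t := by rintro rfl; exact h (List.mem_cons_self ..)
    have : PySem.Set.add (t :: s) x = t :: PySem.Set.add s x := by
      rw [PySem.Set.add, PySem.Set.add]
      have hc : PySem.Set.contains (t :: s) x = PySem.Set.contains s x := by
        simp [PySem.Set.contains, hx]
      rw [hc]
      split <;> simp
    rw [List.foldl_cons, this, List.foldl_cons]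
    exact ih _ (fun hm => h (List.mem_cons_of_mem _ hm))

-- first-seen dedup peels its head: dedup (t :: rest) = t :: dedup (rest without t)
theorem pvDedup_cons (t : String) (rest : List String) :
    PySem.List.dedup (t :: rest)
      = t :: PySem.List.dedup (rest.filter (fun x => x != t)) := by
  have h1 : PySem.List.dedup (t :: rest) = rest.foldl PySem.Set.add [t] := by
    simp [PySem.List.dedup, PySem.Set.ofList, PySem.Set.add, PySem.Set.empty]
  rw [h1, pvFoldAdd_filter t rest [t] (by simp),
      pvFoldAdd_cons t _ _ (by simp)]
  rfl

-- the shrinkage in length under removal is the head's multiplicity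
theorem pvCount_length (t : String) (l : List String) :
    ((l.length : Int) - ((l.filter (fun x => x != t)).length : Int))
      = (l.count t : Int) := by
  have h : l.length = l.count t + (l.filter (fun x => x != t)).length := by
    induction l with
    | nil => simp
    | cons x l ih =>
      by_cases hx : x = t
      · subst hx; simp [ih]; omega
      · have hb : (x != t) = true := by simp [hx]
        simp [hb, hx, ih]; omega
  omega

-- Source B's removal loop produces exactly "each first-seen token with its total count"
theorem pvEmit_eq (l : List String) :
    pvEmit l = (PySem.List.dedup l).map
      (fun t => t ++ PySem.Int.toStr ((l.count t : Int))) := by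
  induction hn : l.length using Nat.strong_induction_on generalizing l with
  | _ n ih =>
    cases l with
    | nil => simp [pvEmit, PySem.List.dedup, PySem.Set.ofList, PySem.Set.empty]
    | cons t rest =>
      have hfilter : (t :: rest).filter (fun x => x != t)
          = rest.filter (fun x => x != t) := by
        simp
      have hlt : (rest.filter (fun x => x != t)).length < n := by
        subst hn
        rw [← hfilter]
        simp only [hfilter]
        exact Nat.lt_succ_of_le (List.length_filter_le _ _)
      rw [pvEmit, pvDedup_cons, List.map_cons]
      congr 1
      · rw [pvCount_length]
      · rw [hfilter, ih _ hlt _ rfl]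
        apply List.map_congr_left
        intro s hs
        have hsmem : s ∈ rest.filter (fun x => x != t) := by
          exact (PySem.List.mem_dedup _ _).mp hs
        have hsne : s ≠ t := by
          have := List.of_mem_filter hsmem
          simpa using this
        congr 2
        rw [List.count_cons]
        have : (rest.filter (fun x => x != t)).count s = rest.count s := by
          apply List.count_filter
          simp [hsne]
        simp [this, Ne.symm hsne]

-- ===== VERDICT (by name: the statement is the Claim_ definition above) =====
theorem calculate_character_frequency_spec : Claim_equal_calculate_character_frequency := by
  intro s _
  show _ = _
  apply String.toList_inj.mp
  rw [calculate_character_frequency, calculate_character_frequency_alt]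
  rw [pvFoldA_eq_tokens, PySem.Dict.foldl_insert_getD_add_one_eq_counter]
  rw [pvFoldAppend_toList, PySem.Dict.items_counter]
  rw [PySem.Str.toList_join]
  simp only [String.toList_empty]
  rw [pvJoin_nil_flatten, pvEmit_eq (pvTokens s)]
  simp [pvTokens, String.toList_append, Function.comp_def, PySem.Int.toList_toStr,
        PySem.List.dedup_eq_ofList]
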